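-- pv_equiv track=rewrite | github.com/michalwrpo/wordle_words | multi_letters.py | multiLetters
-- ===== SOURCE A (Python) =====
-- from typing import List, Tuple
--
-- def multiLetters(words: List[str]) -> Tuple[List[str], List[str], List[str]]:
--     triple = []
--     doublepair = []
--     double = []
--
--     for word in words:
--         counts = [word.count(chr(letter)) for letter in range(ord('A'), ord('Z')+1)]
--         has_double = False
--         for c in counts:
--             if (c == 3):
--                 triple.append(word)
--                 break
--             elif (c == 2):
--                 if has_double:
--                     doublepair.append(word)
--                 else:
--                     has_double = True
--                     double.append(word)
--
--     return triple, doublepair, double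
-- ===== SOURCE B (Python) =====
-- from typing import List, Tuple
--
-- def multiLetters(words: List[str]) -> Tuple[List[str], List[str], List[str]]:
--     triple = []
--     doublepair = []
--     double = []
--
--     for word in words:
--         counts = {}
--         for c in word:
--             if 'A' <= c <= 'Z':
--                 counts[c] = counts.get(c, 0) + 1
--         if 3 in counts.values():
--             triple.append(word)
--             continue
--         npairs = sum(1 for v in counts.values() if v == 2)
--         if npairs:
--             double.append(word)
--             doublepair.extend([word] * (npairs - 1))
--
--     return triple, doublepair, double
-- ===== Notes on version B (the rewrite author's own statement) =====
-- stated objective: faster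
-- what changed: B replaces A's per-word scan of the 26 counts with a has_double flag and a break by a single pass building a letter-count dict over the word, a direct 'any count is 3' test and an arithmetic doublepair extension from the number of doubled letters.
-- intended difference: On lists containing a word with a letter appearing exactly 3 times and also a doubled letter alphabetically smaller than every tripled letter, A appends the word to double (and possibly doublepair) as well as triple, because its scan only breaks when it reaches the tripled letter; B puts such a word only in triple, which is intended since whether a word counts as double should not depend on the alphabetical position of its repeated letters. — e.g. on multiLetters(["ABBCCC"]): A returns (["ABBCCC"], [], ["ABBCCC"]), B returns (["ABBCCC"], [], [])
import Mathlib
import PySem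

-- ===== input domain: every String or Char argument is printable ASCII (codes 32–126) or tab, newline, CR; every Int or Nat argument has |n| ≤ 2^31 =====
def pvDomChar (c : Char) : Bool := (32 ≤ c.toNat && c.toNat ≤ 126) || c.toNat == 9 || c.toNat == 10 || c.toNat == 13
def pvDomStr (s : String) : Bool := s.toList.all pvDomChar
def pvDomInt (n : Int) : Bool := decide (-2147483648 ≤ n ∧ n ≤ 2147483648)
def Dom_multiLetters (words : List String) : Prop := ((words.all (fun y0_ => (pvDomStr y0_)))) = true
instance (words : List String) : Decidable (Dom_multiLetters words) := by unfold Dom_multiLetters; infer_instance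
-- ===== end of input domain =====

-- B replaces A's 26-letter scan with has_double flag and break by a per-word letter-count
-- dict, a direct triple test and an arithmetic doublepair extension (measured faster);
-- on words with a triple plus an alphabetically smaller double (D_ below) the two differ.


-- ===== PORT A =====
-- chr(l): exact for 0 ≤ l < 0x110000 (used here only on 65..90)
def pvChr (l : Int) : Char := Char.ofNat l.toNat

-- A's inner 'for c in counts' loop with the has_double flag and the break at c == 3
def pvLoopA (w : String) (counts : List Int) (hd : Bool)
    (s : List String × List String × List String) : List String × List String × List String :=
  match counts, s with
  | [], s => s
  | c :: rest, (t, dp, d) =>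
    if c = 3 then (t ++ [w], dp, d)
    else if c = 2 then
      if hd then pvLoopA w rest hd (t, dp ++ [w], d)
      else pvLoopA w rest true (t, dp, d ++ [w])
    else pvLoopA w rest hd (t, dp, d)

-- body of A's 'for word in words' loop
def pvStepA (s : List String × List String × List String) (w : String) :
    List String × List String × List String :=
  pvLoopA w ((PySem.List.pyRange 65 91 1).map
    (fun l => (PySem.Str.count w (String.ofList [pvChr l]) : Int))) false s

def multiLetters (words : List String) : List String × List String × List String :=
  words.foldl pvStepA ([], [], [])

-- ===== PORT B =====
-- body of B's 'for word in words' loop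
def pvStepB (s : List String × List String × List String) (w : String) :
    List String × List String × List String :=
  let counts : PySem.Dict Char Int := w.toList.foldl
    (fun d c => if 'A' ≤ c ∧ c ≤ 'Z' then d.insert c (d.getD c 0 + 1) else d)
    PySem.Dict.empty
  if counts.values.contains 3 then (s.1 ++ [w], s.2.1, s.2.2)
  else
    let npairs : Int := counts.values.foldl (fun a v => if v == 2 then a + 1 else a) 0
    if npairs ≠ 0 then (s.1, s.2.1 ++ List.replicate (npairs - 1).toNat w, s.2.2 ++ [w])
    else s

def multiLetters_alt (words : List String) : List String × List String × List String :=
  words.foldl pvStepB ([], [], [])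

-- ===== PRECONDITION & SPEC =====
-- On lists containing a word with a tripled letter and a doubled letter alphabetically
-- smaller than every tripled letter, A appends the word to double (and possibly doublepair)
-- as well as triple, because its alphabetical scan breaks only at the tripled letter;
-- B puts such a word only in triple, the intended classification, since membership in
-- double should not depend on the alphabetical position of the repeated letters.
def pvMulti (w : String) (n : Nat) : List Char :=
  "ABCDEFGHIJKLMNOPQRSTUVWXYZ".toList.filter (w.toList.count · == n)
def pvDWord (w : String) : Bool :=
  (pvMulti w 3).head?.any fun d => (pvMulti w 2).any fun c => decide (c < d)
def D_multiLetters (words : List String) : Prop := words.any pvDWord = true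
instance (words : List String) : Decidable (D_multiLetters words) := by
  unfold D_multiLetters; infer_instance

def Spec_multiLetters (words : List String) (out : List String × List String × List String) : Prop := ¬ D_multiLetters words → out = multiLetters_alt words
instance (words : List String) (out : List String × List String × List String) : Decidable (Spec_multiLetters words out) := by unfold Spec_multiLetters; infer_instance

def pvDiffWitness_multiLetters : List String := ["ABBCCC"]
def pvDiffWitnessOut_multiLetters : (List String × List String × List String) × (List String × List String × List String) :=
  ((["ABBCCC"], [], ["ABBCCC"]), (["ABBCCC"], [], []))

-- ===== CLAIM (what is proved, stated in full; the proofs are below) =====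
def Claim_unchanged_multiLetters : Prop := ∀ (words : List String), Dom_multiLetters words → Spec_multiLetters words (multiLetters words)
def Claim_changed_multiLetters : Prop := Dom_multiLetters (pvDiffWitness_multiLetters) ∧ D_multiLetters (pvDiffWitness_multiLetters) ∧ multiLetters (pvDiffWitness_multiLetters) = pvDiffWitnessOut_multiLetters.1 ∧ multiLetters_alt (pvDiffWitness_multiLetters) = pvDiffWitnessOut_multiLetters.2 ∧ pvDiffWitnessOut_multiLetters.1 ≠ pvDiffWitnessOut_multiLetters.2
def Claim_exact_multiLetters : Prop := ∀ (words : List String), Dom_multiLetters words → D_multiLetters words → multiLetters words ≠ multiLetters_alt words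

-- ===== LEMMAS AND PROOFS =====
def pvUCb (c : Char) : Bool := decide ('A' ≤ c ∧ c ≤ 'Z')
def pvTrips (cs : List (Char × Int)) : List Char := (cs.filter (fun p => p.2 == 3)).map Prod.fst
def pvPairs (cs : List (Char × Int)) : List Char := (cs.filter (fun p => p.2 == 2)).map Prod.fst
def pvKept (cs : List (Char × Int)) : List Char :=
  match pvTrips cs with
  | [] => pvPairs cs
  | t0 :: _ => (pvPairs cs).filter (fun c => decide (c < t0))

theorem mem_pvTrips {cs : List (Char × Int)} {a : Char} (h : a ∈ pvTrips cs) :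
    a ∈ cs.map Prod.fst := by
  simp only [pvTrips, List.mem_map, List.mem_filter] at h
  rcases h with ⟨p, ⟨hp, _⟩, rfl⟩
  exact List.mem_map_of_mem hp

theorem mem_pvPairs {cs : List (Char × Int)} {a : Char} (h : a ∈ pvPairs cs) :
    a ∈ cs.map Prod.fst := by
  simp only [pvPairs, List.mem_map, List.mem_filter] at h
  rcases h with ⟨p, ⟨hp, _⟩, rfl⟩
  exact List.mem_map_of_mem hp

theorem pvLoopA_true (w : String) (cs : List (Char × Int))
    (hs : (cs.map Prod.fst).Pairwise (· < ·)) :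
    ∀ t dp d, pvLoopA w (cs.map Prod.snd) true (t, dp, d) =
      ((if (pvTrips cs).isEmpty then t else t ++ [w]),
       dp ++ List.replicate (pvKept cs).length w, d) := by
  induction cs with
  | nil => intro t dp d; simp [pvLoopA, pvTrips, pvPairs, pvKept]
  | cons p rest ih =>
    obtain ⟨ch, c⟩ := p
    simp only [List.map_cons, List.pairwise_cons] at hs
    obtain ⟨hch, hrest⟩ := hs
    intro t dp d
    by_cases h3 : c = 3
    · subst h3
      have htr : pvTrips ((ch, 3) :: rest) = ch :: pvTrips rest := by
        simp [pvTrips]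
      have hk : pvKept ((ch, 3) :: rest) = [] := by
        simp only [pvKept, htr]
        have hp : pvPairs ((ch, 3) :: rest) = pvPairs rest := by simp [pvPairs]
        rw [hp, List.filter_eq_nil_iff]
        intro a ha
        have := hch a (mem_pvPairs ha)
        simp only [decide_eq_true_eq]
        exact lt_asymm this
      simp [pvLoopA, htr, hk]
    · by_cases h2 : c = 2
      · subst h2
        have htr : pvTrips ((ch, 2) :: rest) = pvTrips rest := by simp [pvTrips]
        have hp : pvPairs ((ch, 2) :: rest) = ch :: pvPairs rest := by simp [pvPairs]
        have hk : pvKept ((ch, 2) :: rest) = ch :: pvKept rest := by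
          simp only [pvKept, htr, hp]
          cases htrips : pvTrips rest with
          | nil => rfl
          | cons t0 ts =>
            have ht0 : ch < t0 := by
              apply hch
              apply mem_pvTrips
              rw [htrips]; exact List.mem_cons_self
            simp [ht0]
        simp only [List.map_cons, pvLoopA, htr, hk]
        rw [ih hrest t (dp ++ [w]) d]
        simp [List.replicate_succ]
      · have htr : pvTrips ((ch, c) :: rest) = pvTrips rest := by simp [pvTrips, h3]
        have hp : pvPairs ((ch, c) :: rest) = pvPairs rest := by simp [pvPairs, h2]
        have hk : pvKept ((ch, c) :: rest) = pvKept rest := by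
          simp only [pvKept, htr, hp]
        simp only [List.map_cons, pvLoopA, htr, hk, if_neg h3, if_neg h2]
        exact ih hrest t dp d

theorem pvLoopA_false (w : String) (cs : List (Char × Int))
    (hs : (cs.map Prod.fst).Pairwise (· < ·)) :
    ∀ t dp d, pvLoopA w (cs.map Prod.snd) false (t, dp, d) =
      ((if (pvTrips cs).isEmpty then t else t ++ [w]),
       (if (pvKept cs).isEmpty then dp else dp ++ List.replicate ((pvKept cs).length - 1) w),
       (if (pvKept cs).isEmpty then d else d ++ [w])) := by
  induction cs with
  | nil => intro t dp d; simp [pvLoopA, pvTrips, pvPairs, pvKept]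
  | cons p rest ih =>
    obtain ⟨ch, c⟩ := p
    simp only [List.map_cons, List.pairwise_cons] at hs
    obtain ⟨hch, hrest⟩ := hs
    intro t dp d
    by_cases h3 : c = 3
    · subst h3
      have htr : pvTrips ((ch, 3) :: rest) = ch :: pvTrips rest := by simp [pvTrips]
      have hk : pvKept ((ch, 3) :: rest) = [] := by
        simp only [pvKept, htr]
        have hp : pvPairs ((ch, 3) :: rest) = pvPairs rest := by simp [pvPairs]
        rw [hp, List.filter_eq_nil_iff]
        intro a ha
        have := hch a (mem_pvPairs ha)
        simp only [decide_eq_true_eq]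
        exact lt_asymm this
      simp [pvLoopA, htr, hk]
    · by_cases h2 : c = 2
      · subst h2
        have htr : pvTrips ((ch, 2) :: rest) = pvTrips rest := by simp [pvTrips]
        have hp : pvPairs ((ch, 2) :: rest) = ch :: pvPairs rest := by simp [pvPairs]
        have hk : pvKept ((ch, 2) :: rest) = ch :: pvKept rest := by
          simp only [pvKept, htr, hp]
          cases htrips : pvTrips rest with
          | nil => rfl
          | cons t0 ts =>
            have ht0 : ch < t0 := by
              apply hch
              apply mem_pvTrips
              rw [htrips]; exact List.mem_cons_self
            simp [ht0]
        simp only [List.map_cons, pvLoopA, htr, hk]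
        rw [pvLoopA_true w rest hrest t dp (d ++ [w])]
        simp
      · have htr : pvTrips ((ch, c) :: rest) = pvTrips rest := by simp [pvTrips, h3]
        have hp : pvPairs ((ch, c) :: rest) = pvPairs rest := by simp [pvPairs, h2]
        have hk : pvKept ((ch, c) :: rest) = pvKept rest := by
          simp only [pvKept, htr, hp]
        simp only [List.map_cons, pvLoopA, htr, hk, if_neg h3, if_neg h2]
        exact ih hrest t dp d

-- the per-word (Char, count) table A reads
def pvTable (w : String) : List (Char × Int) :=
  (PySem.List.pyRange 65 91 1).map
    (fun l => (pvChr l, (PySem.Str.count w (String.ofList [pvChr l]) : Int)))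

def pvRangeChars : List Char := (PySem.List.pyRange 65 91 1).map pvChr

-- str.count with a single-char needle is List.count
theorem count_go_single (c : Char) :
    ∀ (cs : List Char) (fuel acc : Nat), cs.length ≤ fuel →
      PySem.Chars.count.go [c] fuel cs acc = acc + cs.count c := by
  intro cs
  induction cs with
  | nil => intro fuel acc _; cases fuel <;> simp [PySem.Chars.count.go]
  | cons h t ih =>
    intro fuel acc hf
    cases fuel with
    | zero => simp at hf
    | succ f =>
      have hf' : t.length ≤ f := by simpa using hf
      by_cases hc : c = h
      · subst hc
        rw [show PySem.Chars.count.go [c] (f + 1) (c :: t) acc =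
            PySem.Chars.count.go [c] f t (acc + 1) from by
          simp [PySem.Chars.count.go, List.isPrefixOf]]
        rw [ih f (acc + 1) hf', List.count_cons]
        simp
        omega
      · have hpre : ([c].isPrefixOf (h :: t)) = false := by
          simp [List.isPrefixOf]
          exact hc
        rw [show PySem.Chars.count.go [c] (f + 1) (h :: t) acc =
            PySem.Chars.count.go [c] f t acc from by
          simp [PySem.Chars.count.go, hpre]]
        rw [ih f acc hf', List.count_cons]
        simp [Ne.symm hc]

theorem chars_count_single (cs : List Char) (c : Char) :
    PySem.Chars.count cs [c] = cs.count c := by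
  have h2 : ([c] : List Char).isEmpty = false := by simp
  simp only [PySem.Chars.count, h2, Bool.false_eq_true, if_false]
  simpa using count_go_single c cs cs.length 0 le_rfl

theorem pvTable_eq (w : String) :
    pvTable w = pvRangeChars.map (fun c => (c, (w.toList.count c : Int))) := by
  simp [pvTable, pvRangeChars, List.map_map, Function.comp, PySem.Str.count_eq,
    chars_count_single]

theorem pvRangeChars_pairwise : pvRangeChars.Pairwise (· < ·) := by decide

theorem pvRangeChars_nodup : pvRangeChars.Nodup := by decide

theorem mem_pvRangeChars {c : Char} : c ∈ pvRangeChars ↔ ('A' ≤ c ∧ c ≤ 'Z') := by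
  constructor
  · intro h
    have hall : ∀ l ∈ PySem.List.pyRange 65 91 1, 'A' ≤ pvChr l ∧ pvChr l ≤ 'Z' := by decide
    rcases List.mem_map.mp h with ⟨l, hl, rfl⟩
    exact hall l hl
  · rintro ⟨h1, h2⟩
    have hn1 : 65 ≤ c.toNat := by
      have := UInt32.le_iff_toNat_le.mp (Char.le_def.mp h1)
      simpa using this
    have hn2 : c.toNat ≤ 90 := by
      have := UInt32.le_iff_toNat_le.mp (Char.le_def.mp h2)
      simpa using this
    refine List.mem_map.mpr ⟨(c.toNat : Int), ?_, ?_⟩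
    · rw [PySem.List.mem_pyRange_iff_of_pos (by norm_num)]
      exact ⟨by exact_mod_cast hn1, by exact_mod_cast (by omega : c.toNat < 91), one_dvd _⟩
    · simp [pvChr, Char.ofNat_toNat]

theorem pvTrips_map (l : List Char) (f : Char → Int) :
    pvTrips (l.map (fun c => (c, f c))) = l.filter (fun c => f c == 3) := by
  simp [pvTrips, List.filter_map, List.map_map, Function.comp_def]

theorem pvPairs_map (l : List Char) (f : Char → Int) :
    pvPairs (l.map (fun c => (c, f c))) = l.filter (fun c => f c == 2) := by
  simp [pvPairs, List.filter_map, List.map_map, Function.comp_def]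

-- B's conditional counting fold is the fold over the filtered list
theorem foldl_if_filter {β : Type} (g : β → Char → β) :
    ∀ (l : List Char) (b : β),
      l.foldl (fun d c => if 'A' ≤ c ∧ c ≤ 'Z' then g d c else d) b =
      (l.filter pvUCb).foldl g b := by
  intro l
  induction l with
  | nil => intro b; rfl
  | cons h t ih =>
    intro b
    by_cases hc : 'A' ≤ h ∧ h ≤ 'Z'
    · simp [pvUCb, hc, List.foldl_cons, ih]
    · simp [pvUCb, hc, List.foldl_cons, ih]

def pvFl (w : String) : List Char := w.toList.filter pvUCb
def pvVals (w : String) : List Int :=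
  (PySem.Set.ofList (pvFl w)).map (fun k => ((pvFl w).count k : Int))

theorem pv_tripsA (w : String) :
    pvTrips (pvTable w) = pvRangeChars.filter (fun c => ((w.toList.count c : Int)) == 3) := by
  rw [pvTable_eq]; exact pvTrips_map _ _

theorem pv_pairsA (w : String) :
    pvPairs (pvTable w) = pvRangeChars.filter (fun c => ((w.toList.count c : Int)) == 2) := by
  rw [pvTable_eq]; exact pvPairs_map _ _

theorem pv_stepA_closed (w : String) (s : List String × List String × List String) :
    pvStepA s w =
      ((if (pvTrips (pvTable w)).isEmpty then s.1 else s.1 ++ [w]),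
       (if (pvKept (pvTable w)).isEmpty then s.2.1
        else s.2.1 ++ List.replicate ((pvKept (pvTable w)).length - 1) w),
       (if (pvKept (pvTable w)).isEmpty then s.2.2 else s.2.2 ++ [w])) := by
  obtain ⟨t, dp, d⟩ := s
  have hfst : (pvTable w).map Prod.fst = pvRangeChars := by
    rw [pvTable_eq]; simp [List.map_map, Function.comp_def]
  have hsorted : ((pvTable w).map Prod.fst).Pairwise (· < ·) := by
    rw [hfst]; exact pvRangeChars_pairwise
  have hcounts : (PySem.List.pyRange 65 91 1).map
      (fun l => (PySem.Str.count w (String.ofList [pvChr l]) : Int)) =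
      (pvTable w).map Prod.snd := by
    simp [pvTable, List.map_map, Function.comp]
  unfold pvStepA
  rw [hcounts, pvLoopA_false w (pvTable w) hsorted t dp d]

theorem pv_Bdict (w : String) :
    (w.toList.foldl
      (fun d c => if 'A' ≤ c ∧ c ≤ 'Z' then d.insert c (d.getD c 0 + 1) else d)
      (PySem.Dict.empty : PySem.Dict Char Int)) = PySem.Dict.counter (pvFl w) := by
  exact (foldl_if_filter (β := PySem.Dict Char Int)
    (fun d c => d.insert c (d.getD c 0 + 1)) w.toList
    PySem.Dict.empty).trans (PySem.Dict.foldl_insert_getD_add_one_eq_counter (pvFl w))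

theorem pv_vals (w : String) : (PySem.Dict.counter (pvFl w)).values = pvVals w := by
  show ((PySem.Dict.counter (pvFl w)).items.map Prod.snd) = _
  rw [PySem.Dict.items_counter]
  simp [pvVals, List.map_map, Function.comp]

theorem pv_flcount (w : String) : ∀ k ∈ pvFl w, (pvFl w).count k = w.toList.count k := by
  intro k hk
  have hp : pvUCb k = true := (List.mem_filter.mp hk).2
  exact List.count_filter hp

theorem pv_memfl (w : String) (k : Char) :
    k ∈ pvFl w ↔ (k ∈ w.toList ∧ ('A' ≤ k ∧ k ≤ 'Z')) := by
  simp [pvFl, List.mem_filter, pvUCb]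

theorem pv_trip_iff (w : String) :
    (pvTrips (pvTable w)) ≠ [] ↔ ((3 : Int) ∈ pvVals w) := by
  rw [pv_tripsA, pvVals]
  constructor
  · intro h
    rcases List.exists_mem_of_ne_nil _ h with ⟨c, hc⟩
    rcases List.mem_filter.mp hc with ⟨hcr, hc3⟩
    have hc3' : w.toList.count c = 3 := by
      exact_mod_cast (by simpa using hc3 : (w.toList.count c : Int) = 3)
    have hcw : c ∈ w.toList := by
      have : 0 < w.toList.count c := by omega
      exact List.count_pos_iff.mp this
    have hcfl : c ∈ pvFl w := (pv_memfl w c).mpr ⟨hcw, mem_pvRangeChars.mp hcr⟩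
    refine List.mem_map.mpr ⟨c, (PySem.Set.mem_ofList (pvFl w) c).mpr hcfl, ?_⟩
    rw [pv_flcount w c hcfl, hc3']
    norm_num
  · intro h
    rcases List.mem_map.mp h with ⟨k, hk, hk3⟩
    have hkfl : k ∈ pvFl w := (PySem.Set.mem_ofList (pvFl w) k).mp hk
    have hk3' : w.toList.count k = 3 := by
      rw [← pv_flcount w k hkfl]
      exact_mod_cast hk3
    intro hnil
    rw [List.filter_eq_nil_iff] at hnil
    have hkr : k ∈ pvRangeChars := mem_pvRangeChars.mpr ((pv_memfl w k).mp hkfl).2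
    have := hnil k hkr
    simp only [beq_iff_eq] at this
    exact this (by exact_mod_cast hk3')

theorem pv_paircount (w : String) :
    (pvVals w).count 2 = (pvPairs (pvTable w)).length := by
  rw [pv_pairsA, pvVals]
  have hL : ((PySem.Set.ofList (pvFl w)).map (fun k => ((pvFl w).count k : Int))).count 2 =
      ((PySem.Set.ofList (pvFl w)).filter (fun k => ((pvFl w).count k : Int) == 2)).length := by
    rw [List.count, List.countP_map, List.countP_eq_length_filter]
    rfl
  rw [hL]
  have hnd1 : ((PySem.Set.ofList (pvFl w)).filter (fun k => ((pvFl w).count k : Int) == 2)).Nodup :=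
    (PySem.Set.nodup_ofList (pvFl w)).filter _
  have hnd2 : (pvRangeChars.filter (fun c => ((w.toList.count c : Int)) == 2)).Nodup :=
    pvRangeChars_nodup.filter _
  rw [← List.toFinset_card_of_nodup hnd1, ← List.toFinset_card_of_nodup hnd2]
  congr 1
  apply Finset.ext
  intro a
  simp only [List.mem_toFinset, List.mem_filter, PySem.Set.mem_ofList, beq_iff_eq]
  constructor
  · rintro ⟨ha, h2⟩
    have h2' : w.toList.count a = 2 := by rw [← pv_flcount w a ha]; exact_mod_cast h2
    exact ⟨mem_pvRangeChars.mpr ((pv_memfl w a).mp ha).2, by exact_mod_cast h2'⟩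
  · rintro ⟨ha, h2⟩
    have h2' : w.toList.count a = 2 := by exact_mod_cast h2
    have haw : a ∈ w.toList := List.count_pos_iff.mp (by omega)
    have hafl : a ∈ pvFl w := (pv_memfl w a).mpr ⟨haw, mem_pvRangeChars.mp ha⟩
    exact ⟨hafl, by rw [pv_flcount w a hafl]; exact_mod_cast h2'⟩

theorem pv_cast_beq : ∀ n m : Nat, ((n : Int) == (m : Int)) = (n == m) := by
  intro n m; by_cases h : n = m <;> simp [h]

theorem pv_multi3 (w : String) : pvMulti w 3 = pvTrips (pvTable w) := by
  have hstr : pvRangeChars = "ABCDEFGHIJKLMNOPQRSTUVWXYZ".toList := by decide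
  rw [pv_tripsA, hstr, pvMulti]
  exact List.filter_congr fun c _ => (pv_cast_beq (w.toList.count c) 3).symm

theorem pv_multi2 (w : String) : pvMulti w 2 = pvPairs (pvTable w) := by
  have hstr : pvRangeChars = "ABCDEFGHIJKLMNOPQRSTUVWXYZ".toList := by decide
  rw [pv_pairsA, hstr, pvMulti]
  exact List.filter_congr fun c _ => (pv_cast_beq (w.toList.count c) 2).symm

-- a D-word has a nonempty kept list on A's side but a triple on B's side
theorem pv_dword_spec (w : String) (hd : pvDWord w = true) :
    (pvTrips (pvTable w)) ≠ [] ∧ (pvKept (pvTable w)) ≠ [] := by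
  unfold pvDWord at hd
  rw [pv_multi3, pv_multi2] at hd
  rcases ht0 : pvTrips (pvTable w) with _ | ⟨t0, ts⟩
  · rw [ht0] at hd; simp at hd
  · rw [ht0] at hd
    simp only [List.head?_cons, Option.any_some, List.any_eq_true,
      decide_eq_true_eq] at hd
    rcases hd with ⟨c, hc, hlt⟩
    constructor
    · simp
    · unfold pvKept
      rw [ht0]
      intro hnil
      rw [List.filter_eq_nil_iff] at hnil
      exact absurd (decide_eq_true hlt) (by simpa using hnil c hc)

theorem step_eq_of_not_dword (w : String) (hw : pvDWord w ≠ true)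
    (s : List String × List String × List String) : pvStepA s w = pvStepB s w := by
  rw [pv_stepA_closed]
  unfold pvStepB
  simp only [pv_Bdict, pv_vals, PySem.List.foldl_beq_add_one, zero_add]
  by_cases htr : (pvTrips (pvTable w)) = []
  · -- no triple: kept = pairs, counts agree
    have h3no : ¬ ((3 : Int) ∈ pvVals w) := by
      intro h; exact absurd htr ((pv_trip_iff w).mpr h)
    have hcontains : (pvVals w).contains 3 = false := by simpa using h3no
    have hkept : pvKept (pvTable w) = pvPairs (pvTable w) := by
      unfold pvKept; rw [htr]
    have hte : (pvTrips (pvTable w)).isEmpty = true := by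
      rw [List.isEmpty_iff]; exact htr
    rw [hcontains]
    simp only [Bool.false_eq_true, if_false, pv_paircount, hkept, hte, if_true]
    by_cases hp : (pvPairs (pvTable w)).length = 0
    · have hpe : (pvPairs (pvTable w)).isEmpty = true := by
        rw [List.isEmpty_iff_length_eq_zero]; exact hp
      have hz : ¬ (((pvPairs (pvTable w)).length : Int) ≠ 0) := by
        simp [hp]
      rw [if_neg hz]
      simp [hpe]
    · have hpe : (pvPairs (pvTable w)).isEmpty = false := by
        rw [List.isEmpty_eq_false_iff_exists_mem]
        rcases List.exists_mem_of_length_pos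
          (l := pvPairs (pvTable w)) (Nat.pos_of_ne_zero hp) with ⟨x, hx⟩
        exact ⟨x, hx⟩
      have hz : (((pvPairs (pvTable w)).length : Int) ≠ 0) := by
        exact_mod_cast hp
      rw [if_pos hz]
      have hlen : (((pvPairs (pvTable w)).length : Int) - 1).toNat =
          (pvPairs (pvTable w)).length - 1 := by omega
      simp [hpe, hlen]
  · -- a triple exists: kept must be empty since w is not a D-word
    have h3yes : ((3 : Int) ∈ pvVals w) := (pv_trip_iff w).mp htr
    have hcontains : (pvVals w).contains 3 = true := by simpa using h3yes
    have hte : (pvTrips (pvTable w)).isEmpty = false := by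
      simp [htr]
    rcases ht0 : pvTrips (pvTable w) with _ | ⟨t0, ts⟩
    · exact absurd ht0 htr
    have hkept : pvKept (pvTable w) = [] := by
      unfold pvKept
      rw [ht0, List.filter_eq_nil_iff]
      intro a ha
      simp only [decide_eq_true_eq]
      intro halt
      -- w would be a D-word, contradiction
      apply hw
      simp only [pvDWord, pv_multi3, pv_multi2, ht0, List.head?_cons, Option.any_some]
      rw [List.any_eq_true]
      exact ⟨a, ha, decide_eq_true halt⟩
    rw [hcontains]
    simp [hkept]


-- third-component bookkeeping for the tightness proof
def pvBd (w : String) : Bool :=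
  !((pvVals w).contains 3) && ((pvVals w).count 2 != 0)

theorem pv_stepA_third (w : String) (s : List String × List String × List String) :
    (pvStepA s w).2.2 =
      if (pvKept (pvTable w)).isEmpty then s.2.2 else s.2.2 ++ [w] := by
  rw [pv_stepA_closed]

theorem pv_stepB_third (w : String) (s : List String × List String × List String) :
    (pvStepB s w).2.2 = if pvBd w then s.2.2 ++ [w] else s.2.2 := by
  have hfold : List.foldl (fun a v => if v = 2 then a + 1 else a) (0 : Int) (pvVals w) =
      (((pvVals w).count 2 : Int)) := by
    simpa using PySem.List.foldl_beq_add_one (pvVals w) 2 0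
  by_cases hm : (3 : Int) ∈ pvVals w
  · simp [pvStepB, pvBd, pv_Bdict, pv_vals, hm]
  · by_cases hz : (pvVals w).count 2 = 0
    · simp [pvStepB, pvBd, pv_Bdict, pv_vals, hfold, hm, hz]
    · have hz' : (((pvVals w).count 2 : Int)) ≠ 0 := by exact_mod_cast hz
      simp [pvStepB, pvBd, pv_Bdict, pv_vals, hfold, hm, hz, hz']

theorem pv_bd_imp_kept (w : String) (h : pvBd w = true) :
    (!(pvKept (pvTable w)).isEmpty) = true := by
  unfold pvBd at h
  rw [Bool.and_eq_true] at h
  obtain ⟨h3, h2⟩ := h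
  have h3' : ¬ ((3 : Int) ∈ pvVals w) := by
    intro hm
    have : (pvVals w).contains 3 = true := by simpa using hm
    rw [this] at h3
    exact absurd h3 (by simp)
  have htr : pvTrips (pvTable w) = [] := by
    by_contra hne
    exact h3' ((pv_trip_iff w).mp hne)
  have hkept : pvKept (pvTable w) = pvPairs (pvTable w) := by
    unfold pvKept; rw [htr]
  have hz : (pvVals w).count 2 ≠ 0 := by simpa using h2
  rw [pv_paircount] at hz
  rw [hkept]
  simp only [Bool.not_eq_eq_eq_not, Bool.not_true]
  rw [List.isEmpty_eq_false_iff_exists_mem]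
  rcases List.exists_mem_of_length_pos
    (l := pvPairs (pvTable w)) (Nat.pos_of_ne_zero hz) with ⟨x, hx⟩
  exact ⟨x, hx⟩

theorem pv_dword_bits (w : String) (hd : pvDWord w = true) :
    (!(pvKept (pvTable w)).isEmpty) = true ∧ pvBd w = false := by
  obtain ⟨htr, hk⟩ := pv_dword_spec w hd
  constructor
  · simp [hk]
  · have : (pvVals w).contains 3 = true := by
      simpa using (pv_trip_iff w).mp htr
    unfold pvBd
    rw [this]
    simp

theorem pv_third_len_A : ∀ (ws : List String) (s : List String × List String × List String),
    ((ws.foldl pvStepA s).2.2).length =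
      s.2.2.length + ws.countP (fun w => !(pvKept (pvTable w)).isEmpty) := by
  intro ws
  induction ws with
  | nil => intro s; simp
  | cons w t ih =>
    intro s
    rw [List.foldl_cons, ih, List.countP_cons]
    have h3 := pv_stepA_third w s
    by_cases hk : (pvKept (pvTable w)).isEmpty
    · rw [h3, if_pos hk]
      simp [hk]
    · rw [h3, if_neg hk]
      simp [hk]
      omega

theorem pv_third_len_B : ∀ (ws : List String) (s : List String × List String × List String),
    ((ws.foldl pvStepB s).2.2).length = s.2.2.length + ws.countP pvBd := by
  intro ws
  induction ws with
  | nil => intro s; simp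
  | cons w t ih =>
    intro s
    rw [List.foldl_cons, ih, List.countP_cons]
    have h3 := pv_stepB_third w s
    by_cases hb : pvBd w = true
    · rw [h3, if_pos hb]
      simp [hb]
      omega
    · rw [h3, if_neg hb]
      simp [hb]

theorem pv_countP_lt (p q : String → Bool) :
    ∀ (l : List String), (∀ x ∈ l, q x = true → p x = true) →
      (∃ x ∈ l, p x = true ∧ q x = false) → l.countP q < l.countP p := by
  intro l
  induction l with
  | nil => rintro _ ⟨x, hx, _⟩; exact absurd hx (List.not_mem_nil)
  | cons h t ih =>
    rintro hall ⟨x, hx, hpx, hqx⟩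
    rw [List.countP_cons, List.countP_cons]
    rcases List.mem_cons.mp hx with rfl | hxt
    · have hle : t.countP q ≤ t.countP p := by
        apply List.countP_mono_left
        intro y hy
        exact hall y (List.mem_cons_of_mem _ hy)
      rw [hpx, hqx]
      simp
      omega
    · have hlt : t.countP q < t.countP p :=
        ih (fun y hy => hall y (List.mem_cons_of_mem _ hy)) ⟨x, hxt, hpx, hqx⟩
      have hhd : (if q h = true then 1 else 0) ≤ (if p h = true then 1 else 0) := by
        by_cases hq : q h = true
        · rw [if_pos hq, if_pos (hall h List.mem_cons_self hq)]
        · rw [if_neg hq]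
          omega
      omega

theorem foldl_eq_of_no_dword :
    ∀ (words : List String), (∀ w ∈ words, pvDWord w ≠ true) →
      ∀ s, words.foldl pvStepA s = words.foldl pvStepB s := by
  intro words
  induction words with
  | nil => intro _ s; rfl
  | cons w ws ih =>
    intro h s
    simp only [List.foldl_cons]
    rw [step_eq_of_not_dword w (h w List.mem_cons_self) s]
    exact ih (fun x hx => h x (List.mem_cons_of_mem w hx)) _

-- ===== VERDICT (by name: the statements are the Claim_ definitions above) =====
theorem multiLetters_spec : Claim_unchanged_multiLetters := by
  intro words _ hnd
  show multiLetters words = multiLetters_alt words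
  have h : ∀ w ∈ words, pvDWord w ≠ true := by
    intro w hw hdw
    exact hnd (List.any_eq_true.mpr ⟨w, hw, hdw⟩)
  unfold multiLetters multiLetters_alt
  exact foldl_eq_of_no_dword words h ([], [], [])

set_option maxRecDepth 4096 in
theorem multiLetters_changed : Claim_changed_multiLetters := by
  unfold Claim_changed_multiLetters; decide

theorem multiLetters_tight : Claim_exact_multiLetters := by
  intro words _ hd heq
  rcases List.any_eq_true.mp hd with ⟨w0, hw0, hdw⟩
  have hall : ∀ x ∈ words, pvBd x = true → (!(pvKept (pvTable x)).isEmpty) = true :=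
    fun x _ hx => pv_bd_imp_kept x hx
  have hex : ∃ x ∈ words, (!(pvKept (pvTable x)).isEmpty) = true ∧ pvBd x = false := by
    obtain ⟨h1, h2⟩ := pv_dword_bits w0 hdw
    exact ⟨w0, hw0, h1, h2⟩
  have hlt := pv_countP_lt _ pvBd words hall hex
  have hA := pv_third_len_A words ([], [], [])
  have hB := pv_third_len_B words ([], [], [])
  have hlen : (multiLetters words).2.2.length = (multiLetters_alt words).2.2.length := by
    rw [heq]
  unfold multiLetters multiLetters_alt at hlen
  rw [hA, hB] at hlen
  simp at hlen
  omega
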